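-- pv_equiv track=rewrite | github.com/naseeihity/leetcode-daily | dp/321.create-maximum-number.py | maxConcat
-- ===== SOURCE A (Python) =====
-- def maxConcat(nums1, nums2):
--     n1 = len(nums1)
--     n2 = len(nums2)
--     ans = [0]*(n1+n2)
--     s1, s2, index = 0, 0, 0
--
--     while s1 != n1 or s2 != n2:
--         if nums1[s1:] > nums2[s2:]:
--             ans[index] = nums1[s1]
--             s1 += 1
--         else:
--             ans[index] = nums2[s2]
--             s2 += 1
--
--         index += 1
--
--     return ans
-- ===== SOURCE B (Python) =====
-- def maxConcat(nums1, nums2):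
--     n1, n2 = len(nums1), len(nums2)
--     # DP table built bottom-up: gt[i][j] is True iff nums1[i:] > nums2[j:]
--     gt = [None] * (n1 + 1)
--     gt[n1] = [False] * (n2 + 1)
--     for i in range(n1 - 1, -1, -1):
--         below = gt[i + 1]
--         row = [False] * (n2 + 1)
--         row[n2] = True
--         for j in range(n2 - 1, -1, -1):
--             if nums1[i] > nums2[j]:
--                 row[j] = True
--             elif nums1[i] == nums2[j]:
--                 row[j] = below[j + 1]
--         gt[i] = row
--     # merge with O(1) table lookups
--     out = []
--     i = j = 0
--     while i < n1 or j < n2: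
--         if gt[i][j]:
--             out.append(nums1[i])
--             i += 1
--         else:
--             out.append(nums2[j])
--             j += 1
--     return out
-- ===== Notes on version B (the rewrite author's own statement) =====
-- stated objective: alternative
-- what changed: B precomputes a bottom-up dynamic-programming table gt[i][j] = (nums1[i:] > nums2[j:]) and then merges with O(1) table lookups per output digit, instead of A's per-step creation and lexicographic comparison of fresh suffix slices.
import Mathlib
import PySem

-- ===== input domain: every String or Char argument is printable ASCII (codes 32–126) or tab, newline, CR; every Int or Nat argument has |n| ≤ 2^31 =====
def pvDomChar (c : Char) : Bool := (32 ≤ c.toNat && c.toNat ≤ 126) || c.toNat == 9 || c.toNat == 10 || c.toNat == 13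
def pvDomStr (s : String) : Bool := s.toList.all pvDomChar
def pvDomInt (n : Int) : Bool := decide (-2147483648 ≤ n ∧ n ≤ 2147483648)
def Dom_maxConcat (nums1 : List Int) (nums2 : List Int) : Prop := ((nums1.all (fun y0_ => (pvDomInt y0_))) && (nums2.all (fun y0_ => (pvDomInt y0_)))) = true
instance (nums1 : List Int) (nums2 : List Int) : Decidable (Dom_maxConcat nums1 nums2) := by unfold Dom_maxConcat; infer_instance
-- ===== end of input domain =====

-- B replaces A's per-step suffix-slice comparisons by a precomputed bottom-up DP table
-- gt[i][j] = (nums1[i:] > nums2[j:]) and merges with O(1) lookups (objective: alternative algorithm).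

-- ===== PORT A =====
-- Python's '>' on lists of ints (lexicographic, prefix is smaller); exact.
def pyGtList : List Int → List Int → Bool
  | _ :: _, [] => true
  | [], _ => false
  | x :: xs, y :: ys => if x > y then true else if x < y then false else pyGtList xs ys

-- the while loop of A: ans preallocated, filled at index; s1,s2 advance.
-- fuel = n1+n2 only makes the recursion total; the loop runs exactly that many steps.
def loopA (nums1 nums2 : List Int) (fuel : Nat) (ans : List Int) (s1 s2 index : Nat) : List Int :=
  match fuel with
  | 0 => ans
  | fuel + 1 =>
    if s1 ≠ nums1.length ∨ s2 ≠ nums2.length then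
      if pyGtList (nums1.drop s1) (nums2.drop s2) then
        -- nums1[s1] is in range here (the suffix is nonempty since the comparison is true)
        loopA nums1 nums2 fuel (ans.set index (nums1.getD s1 0)) (s1 + 1) s2 (index + 1)
      else
        -- nums2[s2] is in range here (otherwise the suffix comparison would be true)
        loopA nums1 nums2 fuel (ans.set index (nums2.getD s2 0)) s1 (s2 + 1) (index + 1)
    else ans

def maxConcat (nums1 : List Int) (nums2 : List Int) : List Int :=
  loopA nums1 nums2 (nums1.length + nums2.length)
    (List.replicate (nums1.length + nums2.length) 0) 0 0 0

-- ===== PORT B =====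
-- inner for-loop of the table build: one row (positions j .. n2) from the row below
-- (Source B iterates j from n2-1 down to 0 filling a mutable row; structurally this builds
-- the same row back-to-front: entry j from nums1[i], nums2[j] and below[j+1]).
def rowB (x : Int) : List Int → List Bool → List Bool
  | [], _ => [true]                        -- row[n2] = True
  | y :: ys, below =>
      (if x > y then true else if x = y then below.tail.headD false else false)
        :: rowB x ys below.tail

-- outer for-loop: rows for i = n1 down to 0; gt[n1] is the all-False row.
def tableB : List Int → List Int → List (List Bool)
  | [], nums2 => [List.replicate (nums2.length + 1) false]
  | x :: xs, nums2 =>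
      let rest := tableB xs nums2
      rowB x nums2 (rest.headD []) :: rest

-- the merge while-loop: O(1) table lookups; fuel only makes the recursion total.
def loopB (nums1 nums2 : List Int) (gt : List (List Bool)) :
    Nat → Nat → Nat → List Int → List Int
  | 0, _, _, out => out
  | fuel + 1, i, j, out =>
    if i < nums1.length ∨ j < nums2.length then
      if (gt.getD i []).getD j false then
        loopB nums1 nums2 gt fuel (i + 1) j (out ++ [nums1.getD i 0])
      else
        loopB nums1 nums2 gt fuel i (j + 1) (out ++ [nums2.getD j 0])
    else out

def maxConcat_alt (nums1 : List Int) (nums2 : List Int) : List Int :=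
  loopB nums1 nums2 (tableB nums1 nums2) (nums1.length + nums2.length) 0 0 []

-- ===== PRECONDITION & SPEC =====
def Spec_maxConcat (nums1 : List Int) (nums2 : List Int) (out : List Int) : Prop := out = maxConcat_alt nums1 nums2
instance (nums1 : List Int) (nums2 : List Int) (out : List Int) : Decidable (Spec_maxConcat nums1 nums2 out) := by unfold Spec_maxConcat; infer_instance

-- ===== CLAIM (what is proved, stated in full; the proofs are below) =====
def Claim_equal_maxConcat : Prop := ∀ (nums1 : List Int) (nums2 : List Int), Dom_maxConcat nums1 nums2 → Spec_maxConcat nums1 nums2 (maxConcat nums1 nums2)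

-- ===== LEMMAS AND PROOFS =====

theorem pyGtList_true_ne_nil {xs ys : List Int} (h : pyGtList xs ys = true) : xs ≠ [] := by
  cases xs <;> cases ys <;> simp [pyGtList] at h ⊢

theorem pyGtList_nonnil_nil {xs : List Int} (h : xs ≠ []) : pyGtList xs [] = true := by
  cases xs <;> simp [pyGtList] at h ⊢

-- the greedy merge both programs compute, as structural recursion on the suffixes
def mergeG : List Int → List Int → List Int
  | [], ys => ys
  | x :: xs, ys =>
    if pyGtList (x :: xs) ys then x :: mergeG xs ys
    else match ys with
      | y :: ys' => y :: mergeG (x :: xs) ys'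
      | [] => []
termination_by xs ys => xs.length + ys.length
decreasing_by all_goals simp

theorem set_take_succ (l : List Int) (k : Nat) (v : Int) (h : k < l.length) :
    (l.set k v).take (k+1) = l.take k ++ [v] := by
  rw [List.set_eq_take_append_cons_drop, if_pos h, List.take_append]
  simp [Nat.min_eq_left (Nat.le_of_lt h)]

theorem mergeG_nil_left (ys : List Int) : mergeG [] ys = ys := by simp [mergeG]

theorem mergeG_cons_pos (x : Int) (xs ys : List Int) (h : pyGtList (x :: xs) ys = true) :
    mergeG (x :: xs) ys = x :: mergeG xs ys := by
  rw [mergeG.eq_def]; simp [h]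

theorem mergeG_cons_neg (x y : Int) (xs ys : List Int) (h : pyGtList (x :: xs) (y :: ys) = false) :
    mergeG (x :: xs) (y :: ys) = y :: mergeG (x :: xs) ys := by
  rw [mergeG.eq_def]; simp [h]

-- the reference value of row i: entry j is pyGtList (nums1.drop i) (nums2.drop j)
def specRow (xs : List Int) : List Int → List Bool
  | [] => [pyGtList xs []]
  | y :: ys => pyGtList xs (y :: ys) :: specRow xs ys

theorem specRow_tail (xs : List Int) (y : Int) (ys : List Int) :
    (specRow xs (y :: ys)).tail = specRow xs ys := by
  simp [specRow]

theorem specRow_head (xs ys : List Int) : (specRow xs ys).headD false = pyGtList xs ys := by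
  cases ys <;> simp [specRow]

theorem rowB_spec (x : Int) (xs : List Int) :
    ∀ ys : List Int, rowB x ys (specRow xs ys) = specRow (x :: xs) ys := by
  intro ys
  induction ys with
  | nil => simp [rowB, specRow, pyGtList]
  | cons y ys ih =>
    rw [rowB, specRow_tail, ih, specRow]
    congr 1
    rw [specRow_head]
    simp only [pyGtList]
    split_ifs with h1 h2 h3 <;> first | rfl | omega

theorem specRow_nil_left (ys : List Int) :
    specRow [] ys = List.replicate (ys.length + 1) false := by
  induction ys with
  | nil => simp [specRow, pyGtList, List.replicate]
  | cons y ys ih => simp [specRow, pyGtList, ih, List.replicate]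

-- the table is exactly the rows specRow (nums1.drop i) nums2, for i = 0 .. n1
theorem tableB_spec (nums2 : List Int) :
    ∀ nums1 : List Int,
      tableB nums1 nums2 = (List.range (nums1.length + 1)).map (fun i => specRow (nums1.drop i) nums2) := by
  intro nums1
  induction nums1 with
  | nil => simp [tableB, specRow_nil_left]
  | cons x xs ih =>
    rw [tableB]
    simp only [ih]
    have hhead : (((List.range (xs.length + 1)).map (fun i => specRow (xs.drop i) nums2)).headD []) = specRow xs nums2 := by
      rw [List.range_succ_eq_map]
      simp
    rw [hhead, rowB_spec]
    have hlen : (x :: xs).length + 1 = xs.length + 1 + 1 := by simp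
    conv_rhs => rw [hlen, List.range_succ_eq_map]
    simp [List.map_map]

theorem tableB_get (nums1 nums2 : List Int) (i j : Nat)
    (hi : i ≤ nums1.length) (hj : j ≤ nums2.length) :
    ((tableB nums1 nums2).getD i []).getD j false = pyGtList (nums1.drop i) (nums2.drop j) := by
  rw [tableB_spec]
  have hrow : ((List.range (nums1.length + 1)).map (fun i => specRow (nums1.drop i) nums2)).getD i []
      = specRow (nums1.drop i) nums2 := by
    have hi' : i < nums1.length + 1 := by omega
    rw [List.getD_eq_getElem _ _ (by simpa using hi')]
    simp
  rw [hrow]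
  clear hrow hi
  induction nums2 generalizing j with
  | nil =>
    have hj0 : j = 0 := by simp at hj; omega
    subst hj0
    simp [specRow]
  | cons y ys ih =>
    cases j with
    | zero => simp [specRow]
    | succ j =>
      rw [specRow]
      simpa using ih j (by simpa using hj)

-- B's merge loop computes out ++ the greedy merge of the two suffixes
theorem loopB_eq (nums1 nums2 : List Int) :
    ∀ fuel i j out, (nums1.length - i) + (nums2.length - j) ≤ fuel →
      i ≤ nums1.length → j ≤ nums2.length →
    loopB nums1 nums2 (tableB nums1 nums2) fuel i j out
      = out ++ mergeG (nums1.drop i) (nums2.drop j) := by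
  intro fuel
  induction fuel with
  | zero =>
    intro i j out hf hi hj
    have hi' : i = nums1.length := by omega
    have hj' : j = nums2.length := by omega
    rw [loopB]
    subst hi' hj'
    simp [mergeG_nil_left]
  | succ fuel ih =>
    intro i j out hf hi hj
    rw [loopB]
    by_cases hg : i < nums1.length ∨ j < nums2.length
    · rw [if_pos hg, tableB_get nums1 nums2 i j hi hj]
      by_cases hc : pyGtList (nums1.drop i) (nums2.drop j) = true
      · have hi1 : i < nums1.length := by
          by_contra hh
          exact pyGtList_true_ne_nil hc (List.drop_eq_nil_of_le (by omega))
        rw [if_pos hc, ih (i+1) j (out ++ [nums1.getD i 0]) (by omega) (by omega) hj]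
        rw [List.drop_eq_getElem_cons hi1] at hc ⊢
        rw [mergeG_cons_pos _ _ _ hc, List.getD_eq_getElem nums1 0 hi1]
        simp
      · have hj1 : j < nums2.length := by
          by_contra hh
          have hbe : nums2.drop j = [] := List.drop_eq_nil_of_le (by omega)
          rcases hg with hg | hg
          · have hae : nums1.drop i ≠ [] := by
              intro hnil
              have := List.length_drop (l := nums1) (i := i)
              rw [hnil] at this
              simp at this
              omega
            rw [hbe] at hc
            exact hc (pyGtList_nonnil_nil hae)
          · omega
        rw [if_neg hc, ih i (j+1) (out ++ [nums2.getD j 0]) (by omega) hi (by omega)]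
        have hc' : pyGtList (nums1.drop i) (nums2.drop j) = false := by
          simpa using hc
        by_cases hi1 : i < nums1.length
        · rw [List.drop_eq_getElem_cons hi1, List.drop_eq_getElem_cons hj1] at hc' ⊢
          rw [mergeG_cons_neg _ _ _ _ hc', List.getD_eq_getElem nums2 0 hj1]
          simp
        · have hae : nums1.drop i = [] := List.drop_eq_nil_of_le (by omega)
          rw [hae, mergeG_nil_left, mergeG_nil_left, List.drop_eq_getElem_cons hj1,
              List.getD_eq_getElem nums2 0 hj1]
          simp
    · rw [if_neg hg]
      rw [not_or, Nat.not_lt, Nat.not_lt] at hg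
      have hi' : i = nums1.length := by omega
      have hj' : j = nums2.length := by omega
      subst hi' hj'
      simp [mergeG_nil_left]

-- A fills ans left to right with the greedy merge of the two suffixes
theorem loopA_eq (nums1 nums2 : List Int) :
    ∀ fuel s1 s2 ans, fuel = (nums1.length - s1) + (nums2.length - s2) →
      s1 ≤ nums1.length → s2 ≤ nums2.length → ans.length = nums1.length + nums2.length →
    loopA nums1 nums2 fuel ans s1 s2 (s1 + s2) =
      ans.take (s1 + s2) ++ mergeG (nums1.drop s1) (nums2.drop s2) := by
  intro fuel
  induction fuel with
  | zero =>
    intro s1 s2 ans hf h1 h2 hlen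
    have e1 : s1 = nums1.length := by omega
    have e2 : s2 = nums2.length := by omega
    rw [loopA]
    subst e1 e2
    simp [mergeG_nil_left]
    omega
  | succ fuel ih =>
    intro s1 s2 ans hf h1 h2 hlen
    have hguard : s1 ≠ nums1.length ∨ s2 ≠ nums2.length := by omega
    have hidx : s1 + s2 < ans.length := by omega
    rw [loopA, if_pos hguard]
    by_cases hc : pyGtList (nums1.drop s1) (nums2.drop s2) = true
    · have hs1 : s1 < nums1.length := by
        by_contra hh
        exact pyGtList_true_ne_nil hc (List.drop_eq_nil_of_le (by omega))
      rw [if_pos hc]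
      have := ih (s1+1) s2 (ans.set (s1+s2) (nums1.getD s1 0)) (by omega) (by omega) h2 (by simp [hlen])
      have harg : s1 + 1 + s2 = s1 + s2 + 1 := by omega
      rw [harg] at this
      rw [this]
      rw [set_take_succ ans (s1+s2) _ hidx]
      rw [List.drop_eq_getElem_cons hs1] at hc ⊢
      rw [mergeG_cons_pos _ _ _ hc, List.getD_eq_getElem nums1 0 hs1]
      simp
    · have hs2 : s2 < nums2.length := by
        by_contra hh
        have hbe : nums2.drop s2 = [] := List.drop_eq_nil_of_le (by omega)
        rcases hguard with hg | hg
        · have hae : nums1.drop s1 ≠ [] := by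
            intro hnil
            have := List.length_drop (l := nums1) (i := s1)
            rw [hnil] at this
            simp at this
            omega
          rw [hbe] at hc
          exact hc (pyGtList_nonnil_nil hae)
        · omega
      rw [if_neg hc]
      have := ih s1 (s2+1) (ans.set (s1+s2) (nums2.getD s2 0)) (by omega) h1 (by omega) (by simp [hlen])
      have harg : s1 + (s2 + 1) = s1 + s2 + 1 := by omega
      rw [harg] at this
      rw [this]
      rw [set_take_succ ans (s1+s2) _ hidx]
      have hc' : pyGtList (nums1.drop s1) (nums2.drop s2) = false := by
        simp at hc; exact hc
      by_cases hs1 : s1 < nums1.length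
      · rw [List.drop_eq_getElem_cons hs1, List.drop_eq_getElem_cons hs2] at hc' ⊢
        rw [mergeG_cons_neg _ _ _ _ hc', List.getD_eq_getElem nums2 0 hs2]
        simp
      · have hae : nums1.drop s1 = [] := List.drop_eq_nil_of_le (by omega)
        rw [hae, mergeG_nil_left, mergeG_nil_left, List.drop_eq_getElem_cons hs2,
            List.getD_eq_getElem nums2 0 hs2]
        simp

-- ===== VERDICT (by name: the statement is the Claim_ definition above) =====
theorem maxConcat_spec : Claim_equal_maxConcat := by
  intro nums1 nums2 _
  unfold Spec_maxConcat maxConcat maxConcat_alt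
  have hA := loopA_eq nums1 nums2 (nums1.length + nums2.length) 0 0
    (List.replicate (nums1.length + nums2.length) 0) (by omega) (by omega) (by omega) (by simp)
  have hB := loopB_eq nums1 nums2 (nums1.length + nums2.length) 0 0 [] (by omega) (by omega) (by omega)
  simpa using hA.trans (by simpa using hB.symm)
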